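-- pv_equiv track=rewrite | github.com/MrBrantCode/unitest_baseline | mut_generate/mist_train_cf/cf_42241/solution.py | count_uri_prefixes
-- ===== SOURCE A (Python) =====
-- def count_uri_prefixes(synonymLabelURIs):
--     uri_prefix_count = {}
--     for uri in synonymLabelURIs:
--         prefix = uri.split('#')[0]
--         if prefix in uri_prefix_count:
--             uri_prefix_count[prefix] += 1
--         else:
--             uri_prefix_count[prefix] = 1
--     return uri_prefix_count
-- ===== SOURCE B (Python) =====
-- def count_uri_prefixes(synonymLabelURIs):
--     prefixes = [uri.split('#')[0] for uri in synonymLabelURIs]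
--     result = {}
--     while prefixes:
--         p = prefixes[0]
--         result[p] = prefixes.count(p)
--         prefixes = [q for q in prefixes if q != p]
--     return result
-- ===== Notes on version B (the rewrite author's own statement) =====
-- stated objective: alternative
-- what changed: B maintains no counting dict at all: it repeatedly takes the first remaining prefix, records its total via list.count, and filters all its occurrences out before continuing, i.e. group-by-first-occurrence via count-and-filter instead of A's scan-and-increment dict accumulation.
import Mathlib
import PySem

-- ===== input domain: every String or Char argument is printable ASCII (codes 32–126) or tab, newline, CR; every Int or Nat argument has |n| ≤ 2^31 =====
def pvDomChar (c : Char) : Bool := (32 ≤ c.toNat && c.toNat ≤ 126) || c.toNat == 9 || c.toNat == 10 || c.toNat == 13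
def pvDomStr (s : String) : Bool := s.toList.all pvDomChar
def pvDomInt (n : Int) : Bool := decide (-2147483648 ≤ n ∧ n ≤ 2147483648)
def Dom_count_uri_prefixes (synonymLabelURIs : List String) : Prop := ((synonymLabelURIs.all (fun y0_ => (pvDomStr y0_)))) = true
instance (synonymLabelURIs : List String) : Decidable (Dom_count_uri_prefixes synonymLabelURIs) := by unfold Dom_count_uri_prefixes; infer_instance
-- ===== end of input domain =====

-- B replaces A's dict scan-and-increment with recursive group-by-first-occurrence: take the first prefix, count it with list.count, filter it out, recurse; objective: alternative (no speed claim).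


-- shared helper: uri.split('#')[0] — sep '#' ≠ '' so split is defined and never empty, so [0] never raises
def pvPrefixOf (uri : String) : String := ((PySem.Str.split? uri "#").getD []).headD ""

-- ===== PORT A =====
def count_uri_prefixes (synonymLabelURIs : List String) : List (String × Int) :=
  (synonymLabelURIs.foldl
    (fun uri_prefix_count uri =>
      let pfx := pvPrefixOf uri
      if uri_prefix_count.contains pfx then
        uri_prefix_count.modify pfx 0 (· + 1)      -- uri_prefix_count[pfx] += 1
      else
        uri_prefix_count.insert pfx 1)             -- uri_prefix_count[pfx] = 1
    PySem.Dict.empty).items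

-- ===== PORT B =====
-- Source B's while loop: take the head prefix p, record prefixes.count(p), filter p out, continue
def pvGroupCount : List String → List (String × Int)
  | [] => []
  | p :: rest =>
      (p, (((p :: rest).count p : Nat) : Int)) :: pvGroupCount (rest.filter (fun q => q ≠ p))
termination_by l => l.length
decreasing_by
  simp
  exact le_trans (List.length_filter_le _ _) (by simp)

def count_uri_prefixes_alt (synonymLabelURIs : List String) : List (String × Int) :=
  pvGroupCount (synonymLabelURIs.map pvPrefixOf)

-- ===== PRECONDITION & SPEC =====
def Spec_count_uri_prefixes (synonymLabelURIs : List String) (out : List (String × Int)) : Prop := out = count_uri_prefixes_alt synonymLabelURIs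
instance (synonymLabelURIs : List String) (out : List (String × Int)) : Decidable (Spec_count_uri_prefixes synonymLabelURIs out) := by unfold Spec_count_uri_prefixes; infer_instance

-- ===== CLAIM =====
def Claim_equal_count_uri_prefixes : Prop := ∀ (synonymLabelURIs : List String), Dom_count_uri_prefixes synonymLabelURIs → Spec_count_uri_prefixes synonymLabelURIs (count_uri_prefixes synonymLabelURIs)

-- ===== LEMMAS AND PROOFS =====

-- A's if/else step is exactly the Counter step: on a missing key, modify inserts f(default) = 0 + 1 = 1.
theorem pv_step_eq (d : PySem.Dict String Int) (p : String) :
    (if d.contains p then d.modify p 0 (· + 1) else d.insert p 1) = d.modify p 0 (· + 1) := by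
  by_cases h : d.contains p
  · simp [h]
  · simp [h, PySem.Dict.modify, PySem.Dict.getD_of_not_contains]

-- folding Set.add over a list ignores elements already in the accumulator
theorem pv_foldl_add_filter (l s : List String) (x : String) (hx : x ∈ s) :
    List.foldl PySem.Set.add s l = List.foldl PySem.Set.add s (l.filter (fun y => y ≠ x)) := by
  induction l generalizing s with
  | nil => rfl
  | cons y l ih =>
    by_cases hyx : y = x
    · subst hyx
      have hadd : PySem.Set.add s y = s := by simp [PySem.Set.add, hx]
      simp only [List.foldl_cons, hadd, List.filter_cons, decide_eq_true_eq]
      simp only [ne_eq, not_true_eq_false, if_false]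
      exact ih s hx
    · simp only [List.foldl_cons, List.filter_cons, ne_eq, hyx, not_false_eq_true,
        decide_true, if_true]
      have hx' : x ∈ PySem.Set.add s y := by
        simp [PySem.Set.add]; split <;> simp [hx]
      exact ih (PySem.Set.add s y) hx'

-- folding Set.add keeps a leading accumulator element in front when it never reappears
theorem pv_foldl_add_cons (l : List String) (s : List String) (x : String)
    (h : ∀ y ∈ l, y ≠ x) :
    List.foldl PySem.Set.add (x :: s) l = x :: List.foldl PySem.Set.add s l := by
  induction l generalizing s with
  | nil => rfl
  | cons y l ih =>
    have hyx : y ≠ x := h y (by simp)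
    have hstep : PySem.Set.add (x :: s) y = x :: PySem.Set.add s y := by
      by_cases hc : y ∈ s
      · simp [PySem.Set.add, hc, hyx]
      · simp [PySem.Set.add, hc, hyx]
    simp only [List.foldl_cons, hstep]
    exact ih (PySem.Set.add s y) (fun z hz => h z (by simp [hz]))

-- keep-first dedup peels its head and all later copies of it
theorem pv_ofList_cons (p : String) (l : List String) :
    PySem.Set.ofList (p :: l) = p :: PySem.Set.ofList (l.filter (fun q => q ≠ p)) := by
  have h1 : PySem.Set.ofList (p :: l) = List.foldl PySem.Set.add [p] l := by
    simp [PySem.Set.ofList, PySem.Set.add, PySem.Set.empty]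
  rw [h1, pv_foldl_add_filter l [p] p (by simp)]
  have h2 : ∀ y ∈ l.filter (fun q => q ≠ p), y ≠ p := by
    intro y hy; simpa using (List.of_mem_filter hy)
  exact pv_foldl_add_cons _ [] p h2

-- B's count-and-filter recursion computes exactly the (dedup, count) pairs
theorem pv_groupCount_eq_aux (n : Nat) : ∀ l : List String, l.length ≤ n →
    pvGroupCount l = (PySem.Set.ofList l).map (fun k => (k, ((l.count k : Nat) : Int))) := by
  induction n with
  | zero =>
    intro l hl
    have hnil : l = [] := List.eq_nil_of_length_eq_zero (Nat.le_zero.mp hl)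
    subst hnil
    simp [pvGroupCount, PySem.Set.ofList, PySem.Set.empty]
  | succ n ihn =>
    intro l hl
    match l with
    | [] => simp [pvGroupCount, PySem.Set.ofList, PySem.Set.empty]
    | p :: rest =>
    have hrest : (rest.filter (fun q => q ≠ p)).length ≤ n :=
      le_trans (List.length_filter_le _ _) (by simpa using Nat.succ_le_succ_iff.mp hl)
    rw [pvGroupCount, ihn _ hrest, pv_ofList_cons]
    simp only [List.map_cons]
    congr 1
    apply List.map_congr_left
    intro k hk
    have hk' : k ∈ rest.filter (fun q => q ≠ p) := by
      simpa [PySem.Set.mem_ofList] using hk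
    have hkp : k ≠ p := by simpa using List.of_mem_filter hk'
    have hcount : (rest.filter (fun q => q ≠ p)).count k = rest.count k := by
      rw [List.count_filter (by simpa using hkp)]
    have hcons : (p :: rest).count k = rest.count k := by
      simp [List.count_cons]
      exact fun h => hkp h.symm
    simp only [ne_eq, decide_not] at hcount
    simp [hcons, hcount]

theorem pv_groupCount_eq (l : List String) :
    pvGroupCount l = (PySem.Set.ofList l).map (fun k => (k, ((l.count k : Nat) : Int))) :=
  pv_groupCount_eq_aux l.length l le_rfl

-- ===== VERDICT =====
theorem count_uri_prefixes_spec : Claim_equal_count_uri_prefixes := by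
  intro xs _
  unfold Spec_count_uri_prefixes count_uri_prefixes count_uri_prefixes_alt
  have hstep : (fun (d : PySem.Dict String Int) (uri : String) =>
      let pfx := pvPrefixOf uri
      if d.contains pfx then d.modify pfx 0 (· + 1) else d.insert pfx 1)
      = fun d uri => d.modify (pvPrefixOf uri) 0 (· + 1) := by
    funext d uri
    exact pv_step_eq d (pvPrefixOf uri)
  rw [hstep, pv_groupCount_eq]
  calc (xs.foldl (fun d uri => d.modify (pvPrefixOf uri) 0 (· + 1)) PySem.Dict.empty).items
      = ((xs.map pvPrefixOf).foldl (fun d p => d.modify p 0 (· + 1)) PySem.Dict.empty).items := by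
        rw [List.foldl_map]
    _ = (PySem.Set.ofList (xs.map pvPrefixOf)).map
          (fun k => (k, (((xs.map pvPrefixOf).count k : Nat) : Int))) := by
        rw [← PySem.Dict.counter_eq_foldl, PySem.Dict.items_counter]
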